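-- pv_equiv track=rewrite | github.com/ikaragyulieva/PycharmProjects | Python Advanced/Exam Preparation/Past Exam Problems/21_01_exam_prep_02_checkmate.py | direction_to_check
-- ===== SOURCE A (Python) =====
-- def is_in_range(r, c):
--     return 0 <= r < 8 and 0 <= c < 8
--
-- def direction_to_check(r, c, row_movement, col_movement, matrix):
--     for i in range(1, 8):
--         row_index = r + row_movement * i
--         col_index = c + col_movement * i
--         if not is_in_range(row_index, col_index) or matrix[row_index][col_index] == 'Q':
--             break
--         elif matrix[row_index][col_index] == 'K':
--             return True
--     return False
-- ===== SOURCE B (Python) =====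
-- def direction_to_check(r, c, row_movement, col_movement, matrix):
--     # Build the ray of visible cells, stopping at the first off-board square,
--     # then answer by comparing the positions of 'K' and 'Q' on that ray.
--     path = []
--     for i in range(1, 8):
--         ri = r + row_movement * i
--         ci = c + col_movement * i
--         if not (0 <= ri < 8 and 0 <= ci < 8):
--             break
--         path.append(matrix[ri][ci])
--     if 'K' not in path:
--         return False
--     if 'Q' not in path:
--         return True
--     return path.index('K') < path.index('Q')
-- ===== Notes on version B (the rewrite author's own statement) =====
-- stated objective: simpler
-- what changed: B replaces A's walk-with-early-return/break scan by a build-then-query decomposition: it first materialises the on-board ray of cells, then decides the answer from membership and index positions of 'K' and 'Q'; Pre_ excludes inputs where an on-board step of the ray indexes outside the given matrix, on which Python raises IndexError.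
import Mathlib
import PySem

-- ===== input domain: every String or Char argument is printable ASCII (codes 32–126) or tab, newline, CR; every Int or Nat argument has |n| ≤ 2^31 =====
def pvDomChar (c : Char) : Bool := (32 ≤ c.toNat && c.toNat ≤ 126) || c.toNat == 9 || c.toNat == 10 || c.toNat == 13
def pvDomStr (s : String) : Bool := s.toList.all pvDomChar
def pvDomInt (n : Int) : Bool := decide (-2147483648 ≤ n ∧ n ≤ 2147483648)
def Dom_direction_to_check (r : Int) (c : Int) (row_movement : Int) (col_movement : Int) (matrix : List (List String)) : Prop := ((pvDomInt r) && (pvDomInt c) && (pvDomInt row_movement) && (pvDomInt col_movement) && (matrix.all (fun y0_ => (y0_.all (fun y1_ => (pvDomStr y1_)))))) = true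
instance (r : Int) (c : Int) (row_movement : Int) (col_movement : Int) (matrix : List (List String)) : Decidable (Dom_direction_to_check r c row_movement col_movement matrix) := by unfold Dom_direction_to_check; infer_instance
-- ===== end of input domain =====

-- B replaces A's walk-with-break scan by a build-then-query decomposition (same cost, simpler to reason about);
-- Pre_ excludes inputs where an on-board ray step indexes outside the matrix (Python IndexError).


-- ===== PORT A =====
-- matrix[ri][ci]: Pre_ guarantees the indices hit the matrix, so the getD defaults are never used on admitted inputs
def pvCell (matrix : List (List String)) (ri ci : Int) : String :=
  (PySem.List.pyGet? ((PySem.List.pyGet? matrix ri).getD []) ci).getD ""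

def pvIsInRange (r : Int) (c : Int) : Bool :=
  decide (0 ≤ r ∧ r < 8) && decide (0 ≤ c ∧ c < 8)

-- A's for-loop over range(1, 8) with break / early return
def pvGoA (r c rm cm : Int) (matrix : List (List String)) : List Int → Bool
  | [] => false
  | i :: rest =>
    let ri := r + rm * i
    let ci := c + cm * i
    if !pvIsInRange ri ci || pvCell matrix ri ci == "Q" then false
    else if pvCell matrix ri ci == "K" then true
    else pvGoA r c rm cm matrix rest

def direction_to_check (r : Int) (c : Int) (row_movement : Int) (col_movement : Int) (matrix : List (List String)) : Bool :=
  pvGoA r c row_movement col_movement matrix (PySem.List.pyRange 1 8 1)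

-- ===== PORT B =====
-- build the on-board ray of cells, stopping at the first off-board square
def pvBuildPath (r c rm cm : Int) (matrix : List (List String)) : List Int → List String
  | [] => []
  | i :: rest =>
    let ri := r + rm * i
    let ci := c + cm * i
    if decide (0 ≤ ri ∧ ri < 8) && decide (0 ≤ ci ∧ ci < 8) then
      pvCell matrix ri ci :: pvBuildPath r c rm cm matrix rest
    else []

-- the final membership / index query of Source B
def pvQuery (path : List String) : Bool :=
  if !path.contains "K" then false
  else if !path.contains "Q" then true
  else (PySem.List.index? path "K").getD 0 < (PySem.List.index? path "Q").getD 0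

def direction_to_check_alt (r : Int) (c : Int) (row_movement : Int) (col_movement : Int) (matrix : List (List String)) : Bool :=
  pvQuery (pvBuildPath r c row_movement col_movement matrix (PySem.List.pyRange 1 8 1))

-- ===== PRECONDITION & SPEC =====
-- Pre_ excludes inputs where some on-board step of the ray (i = 1..7) indexes outside the given
-- matrix: there Python raises IndexError (matrix smaller than the 8x8 board the code assumes).
def Pre_direction_to_check (r : Int) (c : Int) (row_movement : Int) (col_movement : Int) (matrix : List (List String)) : Prop :=
  ((PySem.List.pyRange 1 8 1).all (fun i =>
    let ri := r + row_movement * i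
    let ci := c + col_movement * i
    !(decide (0 ≤ ri ∧ ri < 8) && decide (0 ≤ ci ∧ ci < 8)) ||
      (match PySem.List.pyGet? matrix ri with
       | none => false
       | some row => (PySem.List.pyGet? row ci).isSome)) = true)
instance (r : Int) (c : Int) (row_movement : Int) (col_movement : Int) (matrix : List (List String)) : Decidable (Pre_direction_to_check r c row_movement col_movement matrix) := by unfold Pre_direction_to_check; infer_instance

def pvWitness_direction_to_check : Int × Int × Int × Int × List (List String) :=
  (0, 0, 0, 0, [["K"]])

def Spec_direction_to_check (r : Int) (c : Int) (row_movement : Int) (col_movement : Int) (matrix : List (List String)) (out : Bool) : Prop := out = direction_to_check_alt r c row_movement col_movement matrix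
instance (r : Int) (c : Int) (row_movement : Int) (col_movement : Int) (matrix : List (List String)) (out : Bool) : Decidable (Spec_direction_to_check r c row_movement col_movement matrix out) := by unfold Spec_direction_to_check; infer_instance

-- ===== CLAIM (what is proved, stated in full; the proofs are below) =====
def Claim_equal_direction_to_check : Prop := ∀ (r : Int) (c : Int) (row_movement : Int) (col_movement : Int) (matrix : List (List String)), Dom_direction_to_check r c row_movement col_movement matrix → Pre_direction_to_check r c row_movement col_movement matrix → Spec_direction_to_check r c row_movement col_movement matrix (direction_to_check r c row_movement col_movement matrix)

-- ===== LEMMAS AND PROOFS =====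

theorem pvWitness_ok :
    Dom_direction_to_check pvWitness_direction_to_check.1 pvWitness_direction_to_check.2.1
      pvWitness_direction_to_check.2.2.1 pvWitness_direction_to_check.2.2.2.1
      pvWitness_direction_to_check.2.2.2.2 ∧
    Pre_direction_to_check pvWitness_direction_to_check.1 pvWitness_direction_to_check.2.1
      pvWitness_direction_to_check.2.2.1 pvWitness_direction_to_check.2.2.2.1
      pvWitness_direction_to_check.2.2.2.2 := by decide

theorem pvQuery_nil : pvQuery [] = false := by simp [pvQuery]

theorem pvQuery_Q (p : List String) : pvQuery ("Q" :: p) = false := by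
  have hne : ("Q" : String) ≠ "K" := by decide
  by_cases hK : "K" ∈ p
  · rcases Option.isSome_iff_exists.mp ((PySem.List.index?_isSome_iff p "K").mpr hK) with ⟨k, hk⟩
    unfold pvQuery
    rw [PySem.List.index?_cons_of_ne p hne, PySem.List.index?_cons_self, hk]
    simp [hK]
  · simp [pvQuery, hK]

theorem pvQuery_K (p : List String) : pvQuery ("K" :: p) = true := by
  have hne : ("K" : String) ≠ "Q" := by decide
  by_cases hQ : "Q" ∈ p
  · rcases Option.isSome_iff_exists.mp ((PySem.List.index?_isSome_iff p "Q").mpr hQ) with ⟨q, hq⟩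
    unfold pvQuery
    rw [PySem.List.index?_cons_of_ne p hne, PySem.List.index?_cons_self, hq]
    simp [hQ]
  · simp [pvQuery, hQ]

theorem pvQuery_other (x : String) (p : List String) (hK : x ≠ "K") (hQ : x ≠ "Q") :
    pvQuery (x :: p) = pvQuery p := by
  by_cases hKm : "K" ∈ p
  · by_cases hQm : "Q" ∈ p
    · rcases Option.isSome_iff_exists.mp ((PySem.List.index?_isSome_iff p "K").mpr hKm) with ⟨k, hk⟩
      rcases Option.isSome_iff_exists.mp ((PySem.List.index?_isSome_iff p "Q").mpr hQm) with ⟨q, hq⟩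
      unfold pvQuery
      rw [PySem.List.index?_cons_of_ne p hK, PySem.List.index?_cons_of_ne p hQ, hk, hq]
      simp [hKm, hQm]
    · simp [pvQuery, hKm, hQm]
      exact Or.inl (fun h => hQ h.symm)
  · simp [pvQuery, hKm]
    intro h
    exact absurd h.symm hK

theorem goA_eq_query (r c rm cm : Int) (matrix : List (List String)) :
    ∀ l : List Int, pvGoA r c rm cm matrix l = pvQuery (pvBuildPath r c rm cm matrix l) := by
  intro l
  induction l with
  | nil => simp [pvGoA, pvBuildPath, pvQuery_nil]
  | cons i rest ih =>
    by_cases hin : (0 ≤ r + rm * i ∧ r + rm * i < 8) ∧ (0 ≤ c + cm * i ∧ c + cm * i < 8)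
    · by_cases hQ : pvCell matrix (r + rm * i) (c + cm * i) = "Q"
      · simp [pvGoA, pvBuildPath, pvIsInRange, hin.1, hin.2, hQ, pvQuery_Q]
      · by_cases hK : pvCell matrix (r + rm * i) (c + cm * i) = "K"
        · simp [pvGoA, pvBuildPath, pvIsInRange, hin.1, hin.2, hK, pvQuery_K]
        · simp only [pvGoA, pvBuildPath, pvIsInRange, hin.1, hin.2]
          simp [hQ, hK, ih, pvQuery_other _ _ hK hQ]
    · have h1 : ¬((0 ≤ r + rm * i ∧ r + rm * i < 8) ∧ (0 ≤ c + cm * i ∧ c + cm * i < 8)) := hin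
      simp only [pvGoA, pvBuildPath, pvIsInRange]
      rcases Decidable.not_and_iff_not_or_not.mp h1 with h | h <;> simp [h, pvQuery_nil]

-- ===== VERDICT (by name: the statement is the Claim_ definition above) =====
theorem direction_to_check_spec : Claim_equal_direction_to_check := by
  intro r c rm cm matrix _ _
  unfold Spec_direction_to_check direction_to_check direction_to_check_alt
  exact goA_eq_query r c rm cm matrix _
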